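-- pv_equiv track=rewrite | github.com/fractal-analytics-platform/fractal-server | tests/99_v2/fractal_tasks_core_mock/utils.py | _extract_common_root
-- ===== SOURCE A (Python) =====
-- def _extract_common_root(paths: list[str]) -> dict[str, str]:
--     shared_plates = []
--     shared_root_dirs = []
--     for path in paths:
--         tmp = path.split(".zarr/")[0]
--         shared_root_dirs.append("/".join(tmp.split("/")[:-1]))
--         shared_plates.append(tmp.split("/")[-1] + ".zarr")
--
--     if len(set(shared_plates)) > 1 or len(set(shared_root_dirs)) > 1:
--         raise ValueError
--     shared_plate = list(shared_plates)[0]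
--     shared_root_dir = list(shared_root_dirs)[0]
--
--     return dict(shared_root_dir=shared_root_dir, shared_plate=shared_plate)
-- ===== SOURCE B (Python) =====
-- def _extract_common_root(paths: list[str]) -> dict[str, str]:
--     def _root_and_plate(path):
--         tmp = path.split(".zarr/")[0]
--         parts = tmp.split("/")
--         return "/".join(parts[:-1]), parts[-1] + ".zarr"
--
--     shared_root_dir, shared_plate = _root_and_plate(paths[0])
--     for path in paths[1:]:
--         if _root_and_plate(path) != (shared_root_dir, shared_plate):
--             raise ValueError
--     return dict(shared_root_dir=shared_root_dir, shared_plate=shared_plate)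
-- ===== Notes on version B (the rewrite author's own statement) =====
-- stated objective: simpler
-- what changed: Instead of accumulating two parallel lists of all root-dirs/plates and deduplicating them via set() at the end, B derives the reference (root_dir, plate) from paths[0] and checks the remaining paths against it in one pass, raising ValueError on the first mismatch; no intermediate lists are built.
import Mathlib
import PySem

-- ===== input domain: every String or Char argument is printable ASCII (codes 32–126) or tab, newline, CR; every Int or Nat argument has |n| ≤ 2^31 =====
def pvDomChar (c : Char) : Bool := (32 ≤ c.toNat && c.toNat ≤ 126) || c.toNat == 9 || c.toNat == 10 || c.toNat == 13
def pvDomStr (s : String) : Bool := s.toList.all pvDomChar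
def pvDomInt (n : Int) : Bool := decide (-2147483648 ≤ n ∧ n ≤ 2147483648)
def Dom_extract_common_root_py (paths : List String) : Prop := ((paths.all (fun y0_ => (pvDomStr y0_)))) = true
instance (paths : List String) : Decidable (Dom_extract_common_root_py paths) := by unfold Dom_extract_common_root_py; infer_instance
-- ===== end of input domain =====

-- B change (objective: simpler): instead of accumulating two parallel lists and deduplicating with set(),
-- B takes the (root_dir, plate) of paths[0] as reference and checks the remaining paths against it in one pass.

-- ===== PORT A =====
-- state: (shared_plates, shared_root_dirs)
def extract_common_root_py (paths : List String) : List (String × String) :=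
  let st := paths.foldl
    (fun (st : List String × List String) path =>
      let tmp := ((PySem.Str.split? path ".zarr/").getD []).headD ""
      let parts := (PySem.Str.split? tmp "/").getD []
      (st.1 ++ [(parts.getLastD "") ++ ".zarr"], st.2 ++ [PySem.Str.join "/" parts.dropLast]))
    ([], [])
  if (PySem.Set.ofList st.1).length > 1 ∨ (PySem.Set.ofList st.2).length > 1 then
    []  -- Python raises ValueError here (outside Pre_)
  else
    match st.1.head?, st.2.head? with
    | some plate, some rd => [("shared_root_dir", rd), ("shared_plate", plate)]
    | _, _ => []  -- Python raises IndexError on empty input (outside Pre_)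

-- ===== PORT B =====
def pvRootAndPlate (path : String) : String × String :=
  let tmp := ((PySem.Str.split? path ".zarr/").getD []).headD ""
  let parts := (PySem.Str.split? tmp "/").getD []
  (PySem.Str.join "/" parts.dropLast, (parts.getLastD "") ++ ".zarr")

def extract_common_root_py_alt (paths : List String) : List (String × String) :=
  match paths with
  | [] => []  -- Python raises IndexError here (outside Pre_)
  | p0 :: rest =>
    let r := pvRootAndPlate p0
    if rest.all (fun p => pvRootAndPlate p == r) then
      [("shared_root_dir", r.1), ("shared_plate", r.2)]
    else []  -- Python raises ValueError here (outside Pre_)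

-- ===== PRECONDITION & SPEC =====
-- Pre_-side copy of the per-path (root_dir, plate) computation (so Pre_'s closure reaches no port).
def pvKey (path : String) : String × String :=
  let tmp := ((PySem.Str.split? path ".zarr/").getD []).headD ""
  let parts := (PySem.Str.split? tmp "/").getD []
  (PySem.Str.join "/" parts.dropLast, (parts.getLastD "") ++ ".zarr")

-- Pre_ excludes exactly the inputs where A raises: the empty list (IndexError) and lists whose
-- paths do not all share the same (root_dir, plate) (ValueError).
def Pre_extract_common_root_py (paths : List String) : Prop :=
  paths ≠ [] ∧ ∀ p ∈ paths, pvKey p = pvKey (paths.headD "")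

instance (paths : List String) : Decidable (Pre_extract_common_root_py paths) := by
  unfold Pre_extract_common_root_py; infer_instance

def pvWitness_extract_common_root_py : List String :=
  ["a.zarr/b"]

def Spec_extract_common_root_py (paths : List String) (out : List (String × String)) : Prop := out = extract_common_root_py_alt paths
instance (paths : List String) (out : List (String × String)) : Decidable (Spec_extract_common_root_py paths out) := by unfold Spec_extract_common_root_py; infer_instance

-- ===== CLAIM (what is proved, stated in full; the proofs are below) =====
def Claim_equal_extract_common_root_py : Prop := ∀ (paths : List String), Dom_extract_common_root_py paths → Pre_extract_common_root_py paths → Spec_extract_common_root_py paths (extract_common_root_py paths)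

-- ===== LEMMAS AND PROOFS =====

theorem pvRootAndPlate_eq_key (p : String) : pvRootAndPlate p = pvKey p := rfl

-- characterisation of A's fold
theorem foldA_eq (paths : List String) (a b : List String) :
    paths.foldl
      (fun (st : List String × List String) path =>
        let tmp := ((PySem.Str.split? path ".zarr/").getD []).headD ""
        let parts := (PySem.Str.split? tmp "/").getD []
        (st.1 ++ [(parts.getLastD "") ++ ".zarr"], st.2 ++ [PySem.Str.join "/" parts.dropLast]))
      (a, b)
    = (a ++ paths.map (fun p => (pvKey p).2), b ++ paths.map (fun p => (pvKey p).1)) := by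
  induction paths generalizing a b with
  | nil => simp
  | cons p ps ih =>
    simp only [List.foldl_cons, List.map_cons]
    rw [ih]
    simp [pvKey, List.append_assoc]

theorem ofList_const (v : String) (l : List String) (h : ∀ x ∈ l, x = v) :
    PySem.Set.ofList (v :: l) = [v] := by
  have : ∀ (l' : List String), (∀ x ∈ l', x = v) → l'.foldl PySem.Set.add [v] = [v] := by
    intro l' h'
    induction l' with
    | nil => rfl
    | cons x xs ih =>
      have hx : x = v := h' x (List.mem_cons_self)
      simp only [List.foldl_cons, hx]
      have : PySem.Set.add [v] v = [v] := by simp [PySem.Set.add, PySem.Set.contains]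
      rw [this]
      exact ih (fun y hy => h' y (List.mem_cons_of_mem _ hy))
  rw [PySem.Set.ofList_eq_foldl]
  simp only [List.foldl_cons]
  have h0 : PySem.Set.add ([] : List String) v = [v] := by
    simp [PySem.Set.add, PySem.Set.contains]
  rw [h0]
  exact this l h

-- ===== VERDICT (by name: the statement is the Claim_ definition above) =====
theorem extract_common_root_py_spec : Claim_equal_extract_common_root_py := by
  intro paths _ hpre
  obtain ⟨hne, hall⟩ := hpre
  cases paths with
  | nil => exact absurd rfl hne
  | cons p0 rest =>
    have hhead : (p0 :: rest).headD "" = p0 := rfl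
    rw [hhead] at hall
    have hrest : ∀ p ∈ rest, pvKey p = pvKey p0 := fun p hp =>
      hall p (List.mem_cons_of_mem _ hp)
    show extract_common_root_py (p0 :: rest) = extract_common_root_py_alt (p0 :: rest)
    -- B side
    have hB : extract_common_root_py_alt (p0 :: rest)
        = [("shared_root_dir", (pvKey p0).1), ("shared_plate", (pvKey p0).2)] := by
      simp only [extract_common_root_py_alt]
      simp [pvRootAndPlate_eq_key]
      exact hrest
    -- A side
    have hA : extract_common_root_py (p0 :: rest)
        = [("shared_root_dir", (pvKey p0).1), ("shared_plate", (pvKey p0).2)] := by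
      simp only [extract_common_root_py]
      rw [show ((p0 :: rest).foldl
            (fun (st : List String × List String) path =>
              let tmp := ((PySem.Str.split? path ".zarr/").getD []).headD ""
              let parts := (PySem.Str.split? tmp "/").getD []
              (st.1 ++ [(parts.getLastD "") ++ ".zarr"], st.2 ++ [PySem.Str.join "/" parts.dropLast]))
            ([], []))
          = ((p0 :: rest).map (fun p => (pvKey p).2), (p0 :: rest).map (fun p => (pvKey p).1))
        from by rw [foldA_eq]; simp]
      have hplates : PySem.Set.ofList ((pvKey p0).2 :: rest.map (fun p => (pvKey p).2)) = [(pvKey p0).2] := by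
        apply ofList_const
        intro x hx
        obtain ⟨p, hp, hpx⟩ := List.mem_map.mp hx
        rw [← hpx, hrest p hp]
      have hroots : PySem.Set.ofList ((pvKey p0).1 :: rest.map (fun p => (pvKey p).1)) = [(pvKey p0).1] := by
        apply ofList_const
        intro x hx
        obtain ⟨p, hp, hpx⟩ := List.mem_map.mp hx
        rw [← hpx, hrest p hp]
      simp [hplates, hroots]
    rw [hA, hB]
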